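-- pv_equiv track=rewrite | github.com/GuideDesigner/DGD-Cas9 | make_arrays.py | return_connection_length
-- ===== SOURCE A (Python) =====
-- from typing import List, Tuple
--
-- def return_connection_length(partner_index: List[int]) -> Tuple[List[int], int]:
--     """
--     Calculate lengths of consecutive paired-base runs.
--
--     Iterates through partner_index, counting consecutive non-zero positions.
--
--     Args:
--         partner_index: List of partner indices.
--
--     Returns:
--         Tuple of (list of run lengths, total count of paired bases).
--     """
--     length_list = []
--     total_count = 0
--     i = 0
--
--     while i < len(partner_index):
--         if partner_index[i] != 0:
--             length = 0
--             while i < len(partner_index) and partner_index[i] != 0: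
--                 length += 1
--                 total_count += 1
--                 i += 1
--             length_list.append(length)
--         else:
--             i += 1
--
--     return length_list, total_count
-- ===== SOURCE B (Python) =====
-- from typing import List, Tuple
--
-- def return_connection_length(partner_index: List[int]) -> Tuple[List[int], int]:
--     # Run lengths as arithmetic gaps between consecutive zero positions
--     # (with sentinels -1 and n); total paired bases = n - number of zeros.
--     n = len(partner_index)
--     zeros = [i for i, x in enumerate(partner_index) if x == 0]
--     bounds = [-1] + zeros + [n]
--     length_list = [b - a - 1 for a, b in zip(bounds, bounds[1:]) if b - a - 1 > 0]
--     return length_list, n - len(zeros)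
-- ===== Notes on version B (the rewrite author's own statement) =====
-- stated objective: alternative
-- what changed: Instead of scanning runs with a shared index and a running counter, B collects the positions of zeros, derives each run length as the arithmetic gap between consecutive zero positions (with sentinels -1 and n), and computes the total as n minus the number of zeros.
import Mathlib
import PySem

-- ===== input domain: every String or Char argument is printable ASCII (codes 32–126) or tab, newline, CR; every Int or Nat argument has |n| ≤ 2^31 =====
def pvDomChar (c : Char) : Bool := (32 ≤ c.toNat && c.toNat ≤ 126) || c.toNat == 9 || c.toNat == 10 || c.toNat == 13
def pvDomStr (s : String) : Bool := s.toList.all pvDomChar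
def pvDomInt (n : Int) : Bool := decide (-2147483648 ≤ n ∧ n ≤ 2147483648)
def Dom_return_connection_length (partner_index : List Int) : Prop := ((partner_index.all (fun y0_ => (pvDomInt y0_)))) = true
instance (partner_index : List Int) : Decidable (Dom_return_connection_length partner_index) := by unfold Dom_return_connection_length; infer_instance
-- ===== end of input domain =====

-- B replaces A's shared-index nested while loops by a staged computation: the positions
-- of zeros, run lengths as gaps between consecutive zero positions (sentinels -1 and n),
-- and total = n - #zeros (alternative decomposition; same asymptotic cost).


-- ===== PORT A =====
-- inner while loop: while i < len(xs) and xs[i] != 0: length += 1; total_count += 1; i += 1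
-- (fuel = number of indices left, xs.length - i at entry, only makes the loop structurally
-- recursive; while fuel covers the remaining indices the fuel-0 exit coincides with i ≥ len)
def rclInner (xs : List Int) : Nat → Nat → Int → Int → Int × Int × Nat
  | 0, i, length, total => (length, total, i)
  | fuel + 1, i, length, total =>
    if i < xs.length ∧ xs.getD i 0 ≠ 0 then
      rclInner xs fuel (i + 1) (length + 1) (total + 1)
    else
      (length, total, i)

-- outer while loop over the shared index i, accumulating length_list and total_count
-- (fuel only bounds the number of outer iterations; i advances by at least 1 each time)
def rclOuter (xs : List Int) : Nat → Nat → List Int → Int → List Int × Int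
  | 0, _, acc, total => (acc, total)
  | fuel + 1, i, acc, total =>
    if i < xs.length then
      if xs.getD i 0 ≠ 0 then
        let r := rclInner xs (xs.length - i) i 0 total
        rclOuter xs fuel r.2.2 (acc ++ [r.1]) r.2.1
      else
        rclOuter xs fuel (i + 1) acc total
    else
      (acc, total)

def return_connection_length (partner_index : List Int) : List Int × Int :=
  rclOuter partner_index partner_index.length 0 [] 0

-- ===== PORT B =====
-- zeros = [i for i, x in enumerate(partner_index) if x == 0], with k the running index
def rclZeros : List Int → Int → List Int
  | [], _ => []
  | x :: t, k => if x = 0 then k :: rclZeros t (k + 1) else rclZeros t (k + 1)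

-- bounds = [-1] + zeros + [n]; [b - a - 1 for a, b in zip(bounds, bounds[1:]) if b-a-1 > 0]
def return_connection_length_alt (partner_index : List Int) : List Int × Int :=
  let n : Int := partner_index.length
  let zeros := rclZeros partner_index 0
  let bounds := (-1) :: (zeros ++ [n])
  let length_list := (bounds.zip bounds.tail).filterMap
    (fun ab => if ab.2 - ab.1 - 1 > 0 then some (ab.2 - ab.1 - 1) else none)
  (length_list, n - zeros.length)

-- ===== PRECONDITION & SPEC =====
def Spec_return_connection_length (partner_index : List Int) (out : List Int × Int) : Prop := out = return_connection_length_alt partner_index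
instance (partner_index : List Int) (out : List Int × Int) : Decidable (Spec_return_connection_length partner_index out) := by unfold Spec_return_connection_length; infer_instance

-- ===== CLAIM (what is proved, stated in full; the proofs are below) =====
def Claim_equal_return_connection_length : Prop := ∀ (partner_index : List Int), Dom_return_connection_length partner_index → Spec_return_connection_length partner_index (return_connection_length partner_index)

-- ===== LEMMAS AND PROOFS =====

-- proof-side bridge: the list of run lengths, carrying the current run's length (none =
-- inside/before a zero block); both ports are proved to produce this list and its sum
def rclGroups : List Int → Option Int → List Int
  | [], none => []
  | [], some c => [c]
  | x :: t, none => if x ≠ 0 then rclGroups t (some 1) else rclGroups t none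
  | x :: t, some c => if x ≠ 0 then rclGroups t (some (c + 1)) else c :: rclGroups t none

-- proof-side recursion equivalent to B's zip/filterMap over bounds, with previous bound p
def rclGaps (p : Int) : List Int → Int → List Int
  | [], n => if n - p - 1 > 0 then [n - p - 1] else []
  | z :: t, n => (if z - p - 1 > 0 then [z - p - 1] else []) ++ rclGaps z t n

-- B's zip/filterMap over the bounds list computes rclGaps
theorem rclZip_eq_gaps (zs : List Int) (p n : Int) :
    ((p :: (zs ++ [n])).zip ((zs ++ [n]))).filterMap
      (fun ab => if ab.2 - ab.1 - 1 > 0 then some (ab.2 - ab.1 - 1) else none)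
      = rclGaps p zs n := by
  induction zs generalizing p with
  | nil => simp [rclGaps, List.filterMap]; split_ifs <;> simp
  | cons z t ih =>
    simp only [List.cons_append, List.zip_cons_cons, List.filterMap_cons, rclGaps]
    rw [ih z]
    split_ifs <;> simp

-- gap arithmetic on zero positions produces exactly the run lengths
theorem rclGaps_eq_groups (xs : List Int) (k : Int) :
    (rclGaps (k - 1) (rclZeros xs k) (k + xs.length) = rclGroups xs none) ∧
    (∀ c : Int, 0 < c →
      rclGaps (k - c - 1) (rclZeros xs k) (k + xs.length) = rclGroups xs (some c)) := by
  induction xs generalizing k with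
  | nil =>
    refine ⟨by simp [rclZeros, rclGaps, rclGroups], fun c hc => ?_⟩
    simp only [rclZeros, rclGaps, rclGroups, List.length_nil, Nat.cast_zero, add_zero]
    rw [if_pos (by omega)]
    have : k - (k - c - 1) - 1 = c := by ring
    rw [this]
  | cons x t ih =>
    constructor
    · by_cases hx : x = 0
      · subst hx
        simp only [rclZeros, rclGroups, ne_eq, not_true_eq_false, if_false, if_true,
          List.length_cons, ite_true, ite_false, reduceIte]
        rw [rclGaps, if_neg (by omega), List.nil_append]
        have h := (ih (k + 1)).1
        convert h using 2 <;> push_cast <;> ring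
      · simp only [rclZeros, if_neg hx, rclGroups, ne_eq, hx, not_false_eq_true, if_true,
          List.length_cons]
        have h := (ih (k + 1)).2 1 (by omega)
        convert h using 2 <;> push_cast <;> ring
    · intro c hc
      by_cases hx : x = 0
      · subst hx
        simp only [rclZeros, rclGroups, ne_eq, not_true_eq_false, if_false, if_true,
          List.length_cons, ite_true, ite_false, reduceIte]
        rw [rclGaps, if_pos (by omega)]
        have hcc : k - (k - c - 1) - 1 = c := by ring
        rw [hcc, List.singleton_append]
        congr 1
        have h := (ih (k + 1)).1
        convert h using 2 <;> push_cast <;> ring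
      · simp only [rclZeros, if_neg hx, rclGroups, ne_eq, hx, not_false_eq_true, if_true,
          List.length_cons]
        have h := (ih (k + 1)).2 (c + 1) (by omega)
        convert h using 2 <;> push_cast <;> ring

-- counting: #zeros + sum of run lengths = length (shifted by the pending run)
theorem rclZeros_sum (xs : List Int) (k : Int) :
    (((rclZeros xs k).length : Int) + (rclGroups xs none).sum = xs.length) ∧
    (∀ c : Int, ((rclZeros xs k).length : Int) + (rclGroups xs (some c)).sum = xs.length + c) := by
  induction xs generalizing k with
  | nil => simp [rclZeros, rclGroups]
  | cons x t ih =>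
    by_cases hx : x = 0
    · subst hx
      simp only [rclZeros, rclGroups, ne_eq, not_true_eq_false, if_false, if_true,
        reduceIte, List.length_cons, List.sum_cons]
      have h := (ih (k + 1)).1
      refine ⟨by push_cast; omega, fun c => by push_cast; omega⟩
    · simp only [rclZeros, if_neg hx, rclGroups, ne_eq, hx, not_false_eq_true, if_true,
        List.length_cons]
      have h1 := (ih (k + 1)).2 1
      refine ⟨by push_cast at h1 ⊢; omega, fun c => ?_⟩
      have h2 := (ih (k + 1)).2 (c + 1)
      push_cast at h2 ⊢
      omega

-- a pending group of length c closes after the rest of the current nonzero run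
theorem rclGroups_some (t : List Int) (c : Int) :
    rclGroups t (some c) =
      (c + ((t.takeWhile (fun y => y ≠ 0)).length : Int)) ::
        rclGroups (t.dropWhile (fun y => y ≠ 0)) none := by
  induction t generalizing c with
  | nil => simp [rclGroups]
  | cons y t' ih =>
    by_cases hy : y = 0
    · simp [rclGroups, List.takeWhile, List.dropWhile, hy]
    · simp only [rclGroups, List.takeWhile, List.dropWhile, hy]
      simp [ih, hy]
      ring

-- the inner while loop counts the nonzero run starting at i and advances i past it
theorem rclInner_eq (xs : List Int) (fuel i : Nat) (length total : Int)
    (hf : xs.length ≤ i + fuel) :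
    rclInner xs fuel i length total =
      (length + (((xs.drop i).takeWhile (fun y => y ≠ 0)).length : Int),
       total + (((xs.drop i).takeWhile (fun y => y ≠ 0)).length : Int),
       i + ((xs.drop i).takeWhile (fun y => y ≠ 0)).length) := by
  induction fuel generalizing i length total with
  | zero =>
    have hnil : xs.drop i = [] := List.drop_eq_nil_of_le (by omega)
    simp [rclInner, hnil]
  | succ fuel ih =>
    rw [rclInner]
    by_cases hi : i < xs.length
    · have hd : xs.drop i = xs[i] :: xs.drop (i + 1) := List.drop_eq_getElem_cons hi
      have hg : xs.getD i 0 = xs[i] := List.getD_eq_getElem xs 0 hi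
      by_cases hz : xs[i] = 0
      · have hcond : ¬ (i < xs.length ∧ xs.getD i 0 ≠ 0) := by
          rw [hg]; exact fun h => h.2 hz
        rw [if_neg hcond, hd]
        simp only [List.takeWhile]
        simp [hz]
      · have hcond : i < xs.length ∧ xs.getD i 0 ≠ 0 := ⟨hi, by rw [hg]; exact hz⟩
        rw [if_pos hcond, ih (i + 1) (length + 1) (total + 1) (by omega), hd]
        simp only [List.takeWhile]
        simp [hz]
        refine ⟨by ring, by ring, by omega⟩
    · have hnil : xs.drop i = [] := List.drop_eq_nil_of_le (by omega)
      rw [if_neg (fun h => hi h.1)]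
      simp [hnil]

-- Python's dropWhile result is the drop past the matched prefix
theorem rcl_dropWhile_eq_drop (l : List Int) :
    l.dropWhile (fun y => y ≠ 0) = l.drop (l.takeWhile (fun y => y ≠ 0)).length := by
  induction l with
  | nil => simp
  | cons x t ih =>
    by_cases hx : x = 0
    · simp [List.dropWhile, List.takeWhile, hx]
    · simp [List.dropWhile, List.takeWhile, hx]
      simpa using ih

-- the outer loop appends the remaining run lengths and adds their sum to the total
theorem rclOuter_eq (xs : List Int) (fuel i : Nat) (acc : List Int) (total : Int)
    (hf : xs.length ≤ i + fuel) :
    rclOuter xs fuel i acc total =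
      (acc ++ rclGroups (xs.drop i) none,
       total + (rclGroups (xs.drop i) none).sum) := by
  induction fuel generalizing i acc total with
  | zero =>
    have hnil : xs.drop i = [] := List.drop_eq_nil_of_le (by omega)
    simp [rclOuter, hnil, rclGroups]
  | succ fuel ih =>
    rw [rclOuter]
    by_cases hi : i < xs.length
    · rw [if_pos hi]
      have hd : xs.drop i = xs[i] :: xs.drop (i + 1) := List.drop_eq_getElem_cons hi
      have hg : xs.getD i 0 = xs[i] := List.getD_eq_getElem xs 0 hi
      by_cases hz : xs[i] = 0
      · rw [if_neg (by rw [hg]; simpa using hz)]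
        rw [ih (i + 1) acc total (by omega), hd, hz]
        rw [show rclGroups ((0 : Int) :: xs.drop (i + 1)) none
              = rclGroups (xs.drop (i + 1)) none from by simp [rclGroups]]
      · rw [if_pos (by rw [hg]; exact hz)]
        have hr := rclInner_eq xs (xs.length - i) i 0 total (by omega)
        have hT : (xs.drop i).takeWhile (fun y => y ≠ 0) =
            xs[i] :: (xs.drop (i + 1)).takeWhile (fun y => y ≠ 0) := by
          rw [hd]; simp [List.takeWhile, hz]
        rw [hT] at hr
        have hrun : rclGroups (xs.drop i) none =
            ((1 : Int) + ((xs.drop (i + 1)).takeWhile (fun y => y ≠ 0)).length) ::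
              rclGroups ((xs.drop (i + 1)).dropWhile (fun y => y ≠ 0)) none := by
          rw [hd]
          rw [show rclGroups (xs[i] :: xs.drop (i + 1)) none
                = rclGroups (xs.drop (i + 1)) (some 1) from by simp [rclGroups, hz]]
          rw [rclGroups_some]
        have hdrop : xs.drop (i + (((xs.drop (i + 1)).takeWhile (fun y => y ≠ 0)).length + 1)) =
            (xs.drop (i + 1)).dropWhile (fun y => y ≠ 0) := by
          rw [rcl_dropWhile_eq_drop, List.drop_drop]
          congr 1
          omega
        rw [hr]
        rw [ih _ _ _ (by
          have hsp := congrArg List.length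
            (List.takeWhile_append_dropWhile (p := fun y : Int => decide (y ≠ 0))
              (l := xs.drop (i + 1)))
          rw [List.length_append, List.length_drop] at hsp
          simp only [List.length_cons]
          omega)]
        simp only [List.length_cons, hdrop, hrun, List.append_assoc, List.singleton_append,
          Prod.mk.injEq, List.sum_cons]
        refine ⟨?_, ?_⟩
        · congr 1
          · push_cast; ring
        · push_cast; ring
    · rw [if_neg hi]
      have hnil : xs.drop i = [] := List.drop_eq_nil_of_le (by omega)
      simp [hnil, rclGroups]

-- ===== VERDICT (by name: the statement is the Claim_ definition above) =====
theorem return_connection_length_spec : Claim_equal_return_connection_length := by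
  intro xs _
  show _ = _
  rw [return_connection_length, rclOuter_eq xs xs.length 0 [] 0 (by omega)]
  simp only [List.drop_zero, List.nil_append, Int.zero_add, zero_add]
  unfold return_connection_length_alt
  simp only [List.tail_cons]
  rw [rclZip_eq_gaps]
  have hg := (rclGaps_eq_groups xs 0).1
  simp only [zero_sub, zero_add] at hg
  have hs := (rclZeros_sum xs 0).1
  refine Prod.ext ?_ ?_
  · simpa using hg.symm
  · simp only
    omega
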